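-- pv_equiv track=rewrite | github.com/ykadirberk/tlprofiler | inject_macro.py | find_signature_start
-- ===== SOURCE A (Python) =====
-- def find_signature_start(lines: list, brace_idx: int) -> int:
--     """
--     Walk backward from brace_idx to find the first line of the function signature.
--     Stops at an empty line or a line ending with ; { } (end of a previous construct).
--     Returns a 0-based line index.
--     """
--     idx = brace_idx - 1
--     while idx >= 0:
--         stripped = lines[idx].strip()
--         if not stripped:
--             return idx + 1
--         if stripped.endswith((';', '{', '}')):
--             return idx + 1
--         if stripped.startswith('#'):
--             return idx + 1
--         idx -= 1
--     return 0
-- ===== SOURCE B (Python) =====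
-- def find_signature_start(lines: list, brace_idx: int) -> int:
--     """Single forward pass: the answer is one past the last boundary line
--     (empty / ends with ; { } / starts with #) strictly before brace_idx."""
--     start = 0
--     for idx in range(brace_idx):
--         s = lines[idx].strip()
--         if not s or s.endswith((';', '{', '}')) or s.startswith('#'):
--             start = idx + 1
--     return start
-- ===== Notes on version B (the rewrite author's own statement) =====
-- stated objective: alternative
-- what changed: Backward early-return scan from brace_idx-1 is replaced by a single forward accumulating pass that keeps 'one past the last boundary line seen so far' and returns it after the loop.
import Mathlib
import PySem

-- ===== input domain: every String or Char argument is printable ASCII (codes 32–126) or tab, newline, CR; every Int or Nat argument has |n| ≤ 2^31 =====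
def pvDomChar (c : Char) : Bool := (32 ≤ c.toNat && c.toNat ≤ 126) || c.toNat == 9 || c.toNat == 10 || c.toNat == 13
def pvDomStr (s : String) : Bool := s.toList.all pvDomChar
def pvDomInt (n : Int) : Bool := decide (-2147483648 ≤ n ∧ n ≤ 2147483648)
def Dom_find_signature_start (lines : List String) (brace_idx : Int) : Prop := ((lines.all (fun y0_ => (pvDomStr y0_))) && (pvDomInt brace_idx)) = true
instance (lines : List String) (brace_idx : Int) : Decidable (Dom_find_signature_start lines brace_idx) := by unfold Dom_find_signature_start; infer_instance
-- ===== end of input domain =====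

-- One honest line: B replaces A's backward early-return scan by a forward
-- accumulating pass (one past the last boundary line before brace_idx); same value, no speed claim.

-- ===== PORT A =====
-- backward while-loop of A, step for step; termination via (idx+1).toNat
def fssA_loop (lines : List String) (idx : Int) : Int :=
  if _h : 0 ≤ idx then
    let stripped := PySem.Str.strip ((PySem.List.pyGet? lines idx).getD "")
    if stripped = "" then idx + 1
    else if PySem.Str.endswith stripped ";" || PySem.Str.endswith stripped "{" || PySem.Str.endswith stripped "}" then idx + 1
    else if PySem.Str.startswith stripped "#" then idx + 1
    else fssA_loop lines (idx - 1)
  else 0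
termination_by (idx + 1).toNat
decreasing_by omega

def find_signature_start (lines : List String) (brace_idx : Int) : Int :=
  fssA_loop lines (brace_idx - 1)

-- ===== PORT B =====
def find_signature_start_alt (lines : List String) (brace_idx : Int) : Int :=
  (PySem.List.pyRange 0 brace_idx 1).foldl
    (fun start idx =>
      let s := PySem.Str.strip ((PySem.List.pyGet? lines idx).getD "")
      if s = "" || PySem.Str.endswith s ";" || PySem.Str.endswith s "{" || PySem.Str.endswith s "}" || PySem.Str.startswith s "#" then
        idx + 1
      else start)
    0

-- ===== PRECONDITION & SPEC =====
-- A raises IndexError iff brace_idx - 1 ≥ len(lines) (the very first access); nothing else is excluded.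
def Pre_find_signature_start (lines : List String) (brace_idx : Int) : Prop :=
  brace_idx ≤ (lines.length : Int)
instance (lines : List String) (brace_idx : Int) : Decidable (Pre_find_signature_start lines brace_idx) := by unfold Pre_find_signature_start; infer_instance

def pvWitness_find_signature_start : List String × Int := (["int f();", "int g(int x)", "{"], 3)

def Spec_find_signature_start (lines : List String) (brace_idx : Int) (out : Int) : Prop := out = find_signature_start_alt lines brace_idx
instance (lines : List String) (brace_idx : Int) (out : Int) : Decidable (Spec_find_signature_start lines brace_idx out) := by unfold Spec_find_signature_start; infer_instance

-- ===== CLAIM (what is proved, stated in full; the proofs are below) =====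
def Claim_equal_find_signature_start : Prop := ∀ (lines : List String) (brace_idx : Int), Dom_find_signature_start lines brace_idx → Pre_find_signature_start lines brace_idx → Spec_find_signature_start lines brace_idx (find_signature_start lines brace_idx)

-- ===== LEMMAS AND PROOFS =====

-- the shared boundary predicate both loops test
def fssBound (lines : List String) (idx : Int) : Bool :=
  let s := PySem.Str.strip ((PySem.List.pyGet? lines idx).getD "")
  s = "" || PySem.Str.endswith s ";" || PySem.Str.endswith s "{" || PySem.Str.endswith s "}" || PySem.Str.startswith s "#"

lemma fss_if_chain (c1 : Prop) [Decidable c1] (b2 b3 b4 b5 : Bool) (x y : Int) :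
    (if c1 then x else if b2 || b3 || b4 then x else if b5 then x else y)
    = if decide c1 || b2 || b3 || b4 || b5 then x else y := by
  by_cases h : c1 <;> cases b2 <;> cases b3 <;> cases b4 <;> cases b5 <;> simp [h]

lemma fssA_loop_eq (lines : List String) (idx : Int) :
    fssA_loop lines idx =
      if 0 ≤ idx then (if fssBound lines idx then idx + 1 else fssA_loop lines (idx - 1)) else 0 := by
  rw [fssA_loop]
  by_cases h : 0 ≤ idx
  · rw [dif_pos h, if_pos h]
    simp only [fssBound]
    exact fss_if_chain _ _ _ _ _ _ _
  · simp [h]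

lemma fssB_step (lines : List String) (l : List Int) (idx : Int) (init : Int) :
    (l ++ [idx]).foldl
      (fun start i =>
        let s := PySem.Str.strip ((PySem.List.pyGet? lines i).getD "")
        if s = "" || PySem.Str.endswith s ";" || PySem.Str.endswith s "{" || PySem.Str.endswith s "}" || PySem.Str.startswith s "#" then
          i + 1
        else start) init =
    (if fssBound lines idx then idx + 1 else
      l.foldl (fun start i =>
        let s := PySem.Str.strip ((PySem.List.pyGet? lines i).getD "")
        if s = "" || PySem.Str.endswith s ";" || PySem.Str.endswith s "{" || PySem.Str.endswith s "}" || PySem.Str.startswith s "#" then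
          i + 1
        else start) init) := by
  rw [List.foldl_append]
  simp only [List.foldl_cons, List.foldl_nil, fssBound]

lemma fss_main (lines : List String) (n : Nat) :
    fssA_loop lines ((n : Int) - 1) = find_signature_start_alt lines (n : Int) := by
  induction n with
  | zero =>
      rw [fssA_loop_eq]
      simp [find_signature_start_alt, PySem.List.pyRange_one_eq_nil (by omega : (0:Int) ≤ 0)]
  | succ n ih =>
      have hcast : ((n + 1 : Nat) : Int) - 1 = (n : Int) := by push_cast; ring
      rw [hcast, fssA_loop_eq]
      unfold find_signature_start_alt
      have hr : PySem.List.pyRange 0 ((n+1 : Nat) : Int) 1 =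
          PySem.List.pyRange 0 (n : Int) 1 ++ [(n : Int)] := by
        have : ((n + 1 : Nat) : Int) = (n : Int) + 1 := by push_cast; ring
        rw [this, PySem.List.pyRange_one_succ_right (by positivity)]
      rw [hr, fssB_step]
      by_cases hb : fssBound lines (n : Int)
      · simp [hb, Int.natCast_nonneg]
      · simp only [hb, if_neg, Bool.false_eq_true, not_false_iff, if_pos (Int.natCast_nonneg n)]
        rw [ih]; rfl

theorem find_signature_start_eq_alt (lines : List String) (brace_idx : Int) :
    find_signature_start lines brace_idx = find_signature_start_alt lines brace_idx := by
  by_cases h : 0 ≤ brace_idx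
  · have := fss_main lines brace_idx.toNat
    rwa [Int.toNat_of_nonneg h] at this
  · unfold find_signature_start find_signature_start_alt
    rw [fssA_loop_eq, PySem.List.pyRange_one_eq_nil (by omega : brace_idx ≤ 0)]
    simp only [List.foldl_nil, if_neg (by omega : ¬ (0:Int) ≤ brace_idx - 1)]

-- ===== VERDICT (by name: the statement is the Claim_ definition above) =====
theorem find_signature_start_spec : Claim_equal_find_signature_start := by
  intro lines brace_idx _ _
  exact find_signature_start_eq_alt lines brace_idx
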